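-- pv_equiv track=rewrite | github.com/juliencegarra/OpenMATB | core/rendering.py | expand_colors_for_line_loop
-- ===== SOURCE A (Python) =====
-- def expand_colors_for_line_loop(colors, orig_n):
--     """Expand colors from LINE_LOOP (n vertices) to LINES (2n vertices)."""
--     bpv = 4
--     result = []
--     for i in range(orig_n):
--         j = (i + 1) % orig_n
--         result.extend(colors[i * bpv : (i + 1) * bpv])
--         result.extend(colors[j * bpv : (j + 1) * bpv])
--     return tuple(result)
-- ===== SOURCE B (Python) =====
-- def expand_colors_for_line_loop(colors, orig_n):
--     """Expand colors from LINE_LOOP (n vertices) to LINES (2n vertices)."""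
--     bpv = 4
--     if orig_n <= 0:
--         return ()
--     first = tuple(colors[:bpv])
--     mid = []
--     for i in range(1, orig_n):
--         block = colors[i * bpv:(i + 1) * bpv]
--         mid += block * 2
--     return first + tuple(mid) + first
-- ===== Notes on version B (the rewrite author's own statement) =====
-- stated objective: alternative
-- what changed: Instead of looping over all n vertices and emitting each block paired with its modulo-computed cyclic successor, B never computes a neighbour: it emits the first block once, duplicates each interior block (i=1..n-1) in place, and closes the loop by appending the first block again.
import Mathlib
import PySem

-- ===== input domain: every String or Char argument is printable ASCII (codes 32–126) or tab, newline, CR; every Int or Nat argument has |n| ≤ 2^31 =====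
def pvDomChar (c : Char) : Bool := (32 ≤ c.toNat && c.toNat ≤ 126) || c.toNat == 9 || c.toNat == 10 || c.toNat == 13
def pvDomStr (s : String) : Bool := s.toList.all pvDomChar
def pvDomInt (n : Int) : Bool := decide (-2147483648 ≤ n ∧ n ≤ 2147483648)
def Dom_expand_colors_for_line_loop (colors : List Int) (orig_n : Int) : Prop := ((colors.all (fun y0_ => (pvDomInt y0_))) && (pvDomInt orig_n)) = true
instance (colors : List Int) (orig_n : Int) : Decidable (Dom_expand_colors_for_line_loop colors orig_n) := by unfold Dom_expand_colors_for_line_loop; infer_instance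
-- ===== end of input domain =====

-- B avoids A's per-vertex cyclic-neighbour pairing: it doubles each interior block and wraps the result with the first block (objective: alternative decomposition, same cost).

-- ===== PORT A =====
def expand_colors_for_line_loop (colors : List Int) (orig_n : Int) : List Int :=
  (PySem.List.pyRange 0 orig_n 1).foldl (fun result i =>
    let j := PySem.Int.mod (i + 1) orig_n
    (result ++ PySem.List.slice colors (some (i * 4)) (some ((i + 1) * 4)))
      ++ PySem.List.slice colors (some (j * 4)) (some ((j + 1) * 4))) []

-- ===== PORT B =====
def expand_colors_for_line_loop_alt (colors : List Int) (orig_n : Int) : List Int :=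
  if orig_n ≤ 0 then []
  else
    let first := PySem.List.slice colors none (some 4)   -- colors[:4]
    let mid := (PySem.List.pyRange 1 orig_n 1).foldl (fun acc i =>
      let block := PySem.List.slice colors (some (i * 4)) (some ((i + 1) * 4))
      acc ++ (block ++ block)) []                        -- block * 2
    first ++ mid ++ first

-- ===== PRECONDITION & SPEC =====
def Spec_expand_colors_for_line_loop (colors : List Int) (orig_n : Int) (out : List Int) : Prop := out = expand_colors_for_line_loop_alt colors orig_n
instance (colors : List Int) (orig_n : Int) (out : List Int) : Decidable (Spec_expand_colors_for_line_loop colors orig_n out) := by unfold Spec_expand_colors_for_line_loop; infer_instance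

-- ===== CLAIM (what is proved, stated in full; the proofs are below) =====
def Claim_equal_expand_colors_for_line_loop : Prop := ∀ (colors : List Int) (orig_n : Int), Dom_expand_colors_for_line_loop colors orig_n → Spec_expand_colors_for_line_loop colors orig_n (expand_colors_for_line_loop colors orig_n)

-- ===== LEMMAS AND PROOFS =====

-- the key reshuffle: pairing each block with its successor (cyclically closed by g t … g 0)
-- is the same list as g 0, the doubled interior blocks, g t reinserted at the ends
lemma pv_key {α : Type} (g : Nat → List α) (t : Nat) :
    (List.range t).flatMap (fun k => g k ++ g (k + 1)) ++ g t
      = g 0 ++ (List.range t).flatMap (fun k => g (k + 1) ++ g (k + 1)) := by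
  induction t with
  | zero => simp
  | succ t ih =>
    rw [List.range_succ]
    simp only [List.flatMap_append, List.flatMap_cons, List.flatMap_nil, List.append_nil,
      ← List.append_assoc]
    have h := congrArg (· ++ (g (t + 1) ++ g (t + 1))) ih
    simpa [List.append_assoc] using h

-- ===== VERDICT (by name: the statement is the Claim_ definition above) =====
theorem expand_colors_for_line_loop_spec : Claim_equal_expand_colors_for_line_loop := by
  intro colors n _
  unfold Spec_expand_colors_for_line_loop expand_colors_for_line_loop expand_colors_for_line_loop_alt
  simp only [List.append_assoc]
  rw [PySem.List.foldl_append_eq_flatMap, PySem.List.foldl_append_eq_flatMap]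
  rw [List.nil_append, List.nil_append, PySem.List.pyRange_one, PySem.List.pyRange_one]
  by_cases hn : n ≤ 0
  · have h0 : (n - 0).toNat = 0 := by omega
    simp only [h0, List.range_zero, List.map_nil, List.flatMap_nil, if_pos hn]
  · simp only [if_neg hn]
    set g : Nat → List Int := fun k =>
      PySem.List.slice colors (some ((k : Int) * 4)) (some (((k : Int) + 1) * 4)) with hg
    have hm : (n - 0).toNat = (n.toNat - 1) + 1 := by omega
    set t : Nat := n.toNat - 1 with ht
    -- left side: flatMap over range (t+1) of g k ++ g ((k+1) mod n)
    have hmap : ∀ k : Nat, k < t + 1 →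
        (fun i : Int => PySem.List.slice colors (some (i * 4)) (some ((i + 1) * 4)) ++
          PySem.List.slice colors (some (PySem.Int.mod (i + 1) n * 4))
            (some ((PySem.Int.mod (i + 1) n + 1) * 4))) (0 + (k : Int))
          = g k ++ g ((k + 1) % (t + 1)) := by
      intro k hk
      have hn' : n = ((t + 1 : Nat) : Int) := by omega
      have hmod : PySem.Int.mod ((k : Int) + 1) n = (((k + 1) % (t + 1) : Nat) : Int) := by
        rw [hn', show ((k : Int) + 1) = (((k + 1 : Nat)) : Int) by push_cast; ring,
          PySem.Int.mod_natCast]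
      simp only [zero_add, hmod, hg]
    have hL : ((List.range ((n - 0).toNat)).map (fun k : Nat => (0 : Int) + (k : Int))).flatMap
        (fun i : Int => PySem.List.slice colors (some (i * 4)) (some ((i + 1) * 4)) ++
          PySem.List.slice colors (some (PySem.Int.mod (i + 1) n * 4))
            (some ((PySem.Int.mod (i + 1) n + 1) * 4)))
        = (List.range (t + 1)).flatMap (fun k => g k ++ g ((k + 1) % (t + 1))) := by
      rw [hm, List.flatMap_map]
      exact List.flatMap_congr (fun k hk => hmap k (List.mem_range.mp hk))
    rw [hL]
    -- split off the last index t, where (t+1) % (t+1) = 0; below it the mod is the identity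
    have hsplit : (List.range (t + 1)).flatMap (fun k => g k ++ g ((k + 1) % (t + 1)))
        = (List.range t).flatMap (fun k => g k ++ g (k + 1)) ++ (g t ++ g 0) := by
      rw [List.range_succ, List.flatMap_append]
      congr 1
      · exact List.flatMap_congr (fun k hk => by
          rw [Nat.mod_eq_of_lt (by have := List.mem_range.mp hk; omega)])
      · simp [Nat.mod_self]
    rw [hsplit, ← List.append_assoc, pv_key]
    -- right side: first = g 0, and the interior fold is the doubled flatMap over 1..n-1
    have hfirst : PySem.List.slice colors none (some 4) = g 0 := by
      simp [hg]
    have hR : ((List.range ((n - 1).toNat)).map (fun k : Nat => (1 : Int) + (k : Int))).flatMap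
        (fun i : Int =>
          PySem.List.slice colors (some (i * 4)) (some ((i + 1) * 4)) ++
          PySem.List.slice colors (some (i * 4)) (some ((i + 1) * 4)))
        = (List.range t).flatMap (fun k => g (k + 1) ++ g (k + 1)) := by
      have ht' : (n - 1).toNat = t := by omega
      rw [ht', List.flatMap_map]
      apply List.flatMap_congr
      intro k _
      have h1 : ((1 : Int) + (k : Int)) = (((k + 1 : Nat)) : Int) := by push_cast; ring
      simp only [hg, h1]
    rw [hfirst, hR]
    simp [List.append_assoc]
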